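-- pv_equiv track=rewrite | github.com/ethanlshen/HierNet | cluster_analysis.py | find_merges
-- ===== SOURCE A (Python) =====
-- def find_merges(c1, c2):
--     """
--     Returns dictionary of how samples in clustering c1 merge into clustering c2.
--     Input:
--     - c1: (n_samples, ) original clustering
--     - c2: (n_samples, ) cluster being merged into
--     Output:
--     - m: {c2_i1: {c1_i1: [i1, i2,...], c1_i2: [i1, i2, ...], ...}, ...}
--     """
--     m = {}
--     for i in range(len(c2)):
--         if c2[i] not in m:
--             m[c2[i]] = {}
--         if c1[i] not in m[c2[i]].keys():
--             m[c2[i]][c1[i]] = []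
--         m[c2[i]][c1[i]].append(i)
--     return m
-- ===== SOURCE B (Python) =====
-- def find_merges(c1, c2):
--     # Group-by-scan: no incremental dict mutation; pick distinct c2 values in
--     # first-occurrence order, then for each (v2, v1) group recompute its index
--     # list by a comprehension over the whole range.
--     n = len(c2)
--     return {
--         v2: {
--             v1: [i for i in range(n) if c2[i] == v2 and c1[i] == v1]
--             for v1 in dict.fromkeys(c1[i] for i in range(n) if c2[i] == v2)
--         }
--         for v2 in dict.fromkeys(c2)
--     }
-- ===== Notes on version B (the rewrite author's own statement) =====
-- stated objective: alternative
-- what changed: Replaces A's single-pass incremental construction of the nested dict by a declarative group-by-scan: the distinct c2 values (dict.fromkeys) index an outer comprehension, and each inner index list is recomputed by filtering the full index range for the (v2, v1) pair, trading A's O(n) one-pass build for repeated scans with no mutation.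
import Mathlib
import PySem

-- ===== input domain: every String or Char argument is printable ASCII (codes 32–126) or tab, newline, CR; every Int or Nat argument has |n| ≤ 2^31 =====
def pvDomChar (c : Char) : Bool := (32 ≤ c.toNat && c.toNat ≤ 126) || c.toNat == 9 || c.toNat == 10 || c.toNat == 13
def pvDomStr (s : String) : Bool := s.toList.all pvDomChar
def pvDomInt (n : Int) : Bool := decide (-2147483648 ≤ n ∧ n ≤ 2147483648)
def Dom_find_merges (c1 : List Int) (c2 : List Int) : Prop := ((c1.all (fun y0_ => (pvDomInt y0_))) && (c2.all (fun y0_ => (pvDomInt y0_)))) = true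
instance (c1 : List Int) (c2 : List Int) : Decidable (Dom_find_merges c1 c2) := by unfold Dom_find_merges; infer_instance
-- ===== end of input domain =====

-- B replaces A's one-pass incremental nested-dict build by a declarative group-by-scan
-- (distinct keys via dict.fromkeys, each index list recomputed by filtering the range);
-- objective: alternative algorithm, not faster.

-- ===== PORT A =====
def find_merges (c1 : List Int) (c2 : List Int) : List (Int × List (Int × List Int)) :=
  let m : PySem.Dict Int (PySem.Dict Int (List Int)) :=
    (PySem.List.pyRange 0 (Int.ofNat c2.length) 1).foldl
      (fun m i =>
        let v2 := PySem.List.pyGetD c2 i 0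
        let v1 := PySem.List.pyGetD c1 i 0
        let m := if m.contains v2 then m else m.insert v2 PySem.Dict.empty
        let inner := m.getD v2 PySem.Dict.empty
        let inner := if inner.contains v1 then inner else inner.insert v1 []
        m.insert v2 (inner.insert v1 (inner.getD v1 [] ++ [i])))
      PySem.Dict.empty
  m.items.map (fun p => (p.1, p.2.items))

-- ===== PORT B =====
def find_merges_alt (c1 : List Int) (c2 : List Int) : List (Int × List (Int × List Int)) :=
  let n : Int := Int.ofNat c2.length
  (PySem.List.dedup c2).map (fun v2 =>
    (v2,
      (PySem.List.dedup
          (((PySem.List.pyRange 0 n 1).filter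
              (fun i => PySem.List.pyGetD c2 i 0 == v2)).map
            (fun i => PySem.List.pyGetD c1 i 0))).map
        (fun v1 =>
          (v1, (PySem.List.pyRange 0 n 1).filter
            (fun i => PySem.List.pyGetD c2 i 0 == v2 && PySem.List.pyGetD c1 i 0 == v1)))))

-- ===== PRECONDITION & SPEC =====
-- Pre_ excludes only the inputs where A raises IndexError: c1 shorter than c2 (c1[i] out of range).
def Pre_find_merges (c1 : List Int) (c2 : List Int) : Prop := c2.length ≤ c1.length
instance (c1 : List Int) (c2 : List Int) : Decidable (Pre_find_merges c1 c2) := by unfold Pre_find_merges; infer_instance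
def pvWitness_find_merges : List Int × List Int := ([0, 1, 0, 2], [5, 5, 6, 5])

def Spec_find_merges (c1 : List Int) (c2 : List Int) (out : List (Int × List (Int × List Int))) : Prop := out = find_merges_alt c1 c2
instance (c1 : List Int) (c2 : List Int) (out : List (Int × List (Int × List Int))) : Decidable (Spec_find_merges c1 c2 out) := by unfold Spec_find_merges; infer_instance

-- ===== CLAIM (what is proved, stated in full; the proofs are below) =====
def Claim_equal_find_merges : Prop := ∀ (c1 : List Int) (c2 : List Int), Dom_find_merges c1 c2 → Pre_find_merges c1 c2 → Spec_find_merges c1 c2 (find_merges c1 c2)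

-- ===== LEMMAS AND PROOFS =====

-- A's loop body, as a step function over ((c2[i], c1[i]), i) triples.
def pvAstep (m : PySem.Dict Int (PySem.Dict Int (List Int))) (p : (Int × Int) × Int) :
    PySem.Dict Int (PySem.Dict Int (List Int)) :=
  let m := if m.contains p.1.1 then m else m.insert p.1.1 PySem.Dict.empty
  let inner := m.getD p.1.1 PySem.Dict.empty
  let inner := if inner.contains p.1.2 then inner else inner.insert p.1.2 []
  m.insert p.1.1 (inner.insert p.1.2 (inner.getD p.1.2 [] ++ [p.2]))

-- B's result, as a function of the same triples.
def pvInner (ps : List ((Int × Int) × Int)) (a : Int) : List (Int × List Int) :=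
  (PySem.List.dedup ((ps.filter (fun p => p.1.1 == a)).map (fun p => p.1.2))).map
    (fun b => (b, (ps.filter (fun p => p.1.1 == a && p.1.2 == b)).map (fun p => p.2)))

def pvSpec (ps : List ((Int × Int) × Int)) : List (Int × List (Int × List Int)) :=
  (PySem.List.dedup (ps.map (fun p => p.1.1))).map (fun a => (a, pvInner ps a))

theorem pvAstep_simp (m : PySem.Dict Int (PySem.Dict Int (List Int))) (a b i : Int) :
    pvAstep m ((a, b), i) =
      (let m1 := if m.contains a then m else m.insert a PySem.Dict.empty
       m1.insert a ((m1.getD a PySem.Dict.empty).insert b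
         ((m1.getD a PySem.Dict.empty).getD b [] ++ [i]))) := by
  simp only [pvAstep]
  set m1 := if m.contains a then m else m.insert a PySem.Dict.empty with hm1
  set I := m1.getD a PySem.Dict.empty with hI
  by_cases hb : I.contains b = true
  · simp [hb]
  · simp only [Bool.not_eq_true] at hb
    simp [hb, PySem.Dict.getD_insert_self, PySem.Dict.insert_insert_self,
      PySem.Dict.getD_of_not_contains _ _ hb]

theorem pvDedup_append_of_mem {x : Int} {l : List Int} (h : x ∈ l) :
    PySem.List.dedup (l ++ [x]) = PySem.List.dedup l := by
  simp only [PySem.List.dedup_eq_ofList, PySem.Set.ofList_append_singleton]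
  exact PySem.Set.add_of_mem ((PySem.Set.mem_ofList _ _).mpr h)

theorem pvDedup_append_of_not_mem {x : Int} {l : List Int} (h : x ∉ l) :
    PySem.List.dedup (l ++ [x]) = PySem.List.dedup l ++ [x] := by
  simp only [PySem.List.dedup_eq_ofList, PySem.Set.ofList_append_singleton]
  exact PySem.Set.add_of_not_mem (fun hm => h ((PySem.Set.mem_ofList _ _).mp hm))

theorem pvFilter1_nil (ps : List ((Int × Int) × Int)) (a : Int)
    (h : a ∉ ps.map (fun p => p.1.1)) :
    ps.filter (fun p => p.1.1 == a) = [] := by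
  rw [List.filter_eq_nil_iff]
  intro p hp
  simp only [beq_iff_eq]
  intro he
  exact h (he ▸ List.mem_map_of_mem hp)

theorem pvFilterB_nil (ps : List ((Int × Int) × Int)) (a b : Int)
    (h : b ∉ (ps.filter (fun p => p.1.1 == a)).map (fun p => p.1.2)) :
    ps.filter (fun p => p.1.1 == a && p.1.2 == b) = [] := by
  rw [List.filter_eq_nil_iff]
  intro p hp
  simp only [Bool.and_eq_true, beq_iff_eq, not_and]
  intro h1 h2
  exact h (h2 ▸ List.mem_map_of_mem (List.mem_filter.mpr ⟨hp, by simp [h1]⟩))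

theorem pvInner_append_ne (ps : List ((Int × Int) × Int)) (q : (Int × Int) × Int) (a : Int)
    (h : q.1.1 ≠ a) : pvInner (ps ++ [q]) a = pvInner ps a := by
  have h1 : (q.1.1 == a) = false := by simp [h]
  simp [pvInner, List.filter_append, h1]

theorem pvInner_append_self (ps : List ((Int × Int) × Int)) (a b i : Int) :
    pvInner (ps ++ [((a, b), i)]) a =
      (PySem.List.dedup ((ps.filter (fun p => p.1.1 == a)).map (fun p => p.1.2) ++ [b])).map
        (fun b' => (b', (ps.filter (fun p => p.1.1 == a && p.1.2 == b')).map (fun p => p.2)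
          ++ (if b' = b then [i] else []))) := by
  simp only [pvInner, List.filter_append, List.map_append]
  simp only [List.filter_cons, List.filter_nil]
  simp only [beq_self_eq_true, if_pos, List.map_cons, List.map_nil]
  apply List.map_congr_left
  intro b' _
  by_cases hb : b' = b
  · subst hb; simp
  · have : (b == b') = false := by simp [Ne.symm hb]
    simp [this, hb]

-- A's dict state after the fold, read out as nested item lists, is exactly pvSpec.
theorem pvMain (ps : List ((Int × Int) × Int)) :
    ((ps.foldl pvAstep PySem.Dict.empty).items).map (fun p => (p.1, p.2.items)) = pvSpec ps := by
  induction ps using List.reverseRecOn with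
  | nil => rfl
  | append_singleton ps q ih =>
    obtain ⟨⟨a, b⟩, i⟩ := q
    rw [List.foldl_append, List.foldl_cons, List.foldl_nil]
    set M := ps.foldl pvAstep PySem.Dict.empty with hM
    -- facts derived from the induction hypothesis
    have hkeys : M.items.map (fun p => p.1) = PySem.List.dedup (ps.map (fun p => p.1.1)) := by
      rw [show (fun p : Int × PySem.Dict Int (List Int) => p.1)
            = (fun r : Int × List (Int × List Int) => r.1) ∘ (fun p => (p.1, p.2.items)) from rfl,
          ← List.map_map, ih, pvSpec, List.map_map]
      refine Eq.trans ?_ (List.map_id _)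
      apply List.map_congr_left; intro x _; rfl
    have hnodup : M.keys.Nodup := by
      show (M.items.map (fun p => p.1)).Nodup
      rw [hkeys]
      simp [PySem.List.dedup_eq_ofList, PySem.Set.nodup_ofList]
    have hcont : M.contains a = true ↔ a ∈ ps.map (fun p => p.1.1) := by
      rw [PySem.Dict.contains_iff_mem_keys]
      show a ∈ M.items.map (fun p => p.1) ↔ _
      rw [hkeys]
      simp
    rw [pvAstep_simp]
    by_cases hc : M.contains a = true
    · -- a is an existing outer key
      have hamem : a ∈ ps.map (fun p => p.1.1) := hcont.mp hc
      simp only [hc, if_true]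
      -- the inner dict at a
      obtain ⟨p, hpmem, hpfst⟩ := List.mem_map.mp (show a ∈ M.items.map (fun p => p.1) by
        rw [hkeys]; simpa [PySem.List.dedup_eq_ofList, PySem.Set.mem_ofList] using hamem)
      have hItems : p.2.items = pvInner ps a := by
        have hfp : (a, p.2.items) ∈ M.items.map (fun p => (p.1, p.2.items)) := by
          rw [← hpfst]; exact List.mem_map_of_mem hpmem
        rw [ih] at hfp
        obtain ⟨a', _, ha'⟩ := List.mem_map.mp hfp
        have : a' = a := congrArg Prod.fst ha'
        subst this
        exact (congrArg Prod.snd ha').symm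
      set I := M.getD a PySem.Dict.empty with hIdef
      have hgetD : I = p.2 := by
        have : (a, p.2) ∈ M.items := by rw [← hpfst]; exact hpmem
        exact PySem.Dict.getD_of_mem_items _ this hnodup _
      have hI : I.items = pvInner ps a := by rw [hgetD, hItems]
      have hIkeys : I.items.map (fun p => p.1) =
          PySem.List.dedup ((ps.filter (fun p => p.1.1 == a)).map (fun p => p.1.2)) := by
        rw [hI, pvInner, List.map_map]
        refine Eq.trans ?_ (List.map_id _)
        apply List.map_congr_left; intro x _; rfl
      have hInodup : I.keys.Nodup := by
        show (I.items.map (fun p => p.1)).Nodup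
        rw [hIkeys]
        simp [PySem.List.dedup_eq_ofList, PySem.Set.nodup_ofList]
      have hIcont : I.contains b = true ↔ b ∈ (ps.filter (fun p => p.1.1 == a)).map (fun p => p.1.2) := by
        rw [PySem.Dict.contains_iff_mem_keys]
        show b ∈ I.items.map (fun p => p.1) ↔ _
        rw [hIkeys]; simp
      -- value of the updated inner dict's items
      have hVitems : (I.insert b (I.getD b [] ++ [i])).items = pvInner (ps ++ [((a, b), i)]) a := by
        rw [pvInner_append_self]
        by_cases hbc : I.contains b = true
        · have hbmem : b ∈ (ps.filter (fun p => p.1.1 == a)).map (fun p => p.1.2) := hIcont.mp hbc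
          have hbI : (b, (ps.filter (fun p => p.1.1 == a && p.1.2 == b)).map (fun p => p.2)) ∈ I.items := by
            rw [hI]
            exact List.mem_map_of_mem (by simpa [PySem.List.mem_dedup] using hbmem)
          have hgb : I.getD b [] = (ps.filter (fun p => p.1.1 == a && p.1.2 == b)).map (fun p => p.2) :=
            PySem.Dict.getD_of_mem_items _ hbI hInodup _
          rw [PySem.Dict.items_insert_of_contains _ _ hbc, hgb,
            pvDedup_append_of_mem hbmem, hI, pvInner, List.map_map]
          apply List.map_congr_left
          intro b' hb'
          simp only [Function.comp]
          by_cases hbb : b' = b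
          · subst hbb; simp
          · have : (b' == b) = false := by simp [hbb]
            simp [this, hbb]
        · have hbc' : I.contains b = false := by simpa using hbc
          have hbmem : b ∉ (ps.filter (fun p => p.1.1 == a)).map (fun p => p.1.2) := by
            intro h; rw [hIcont.mpr h] at hbc'; simp at hbc'
          rw [PySem.Dict.items_insert_of_not_contains _ _ hbc',
            PySem.Dict.getD_of_not_contains _ _ hbc',
            pvDedup_append_of_not_mem hbmem, List.map_append, hI, pvInner]
          congr 1
          · apply List.map_congr_left
            intro b' hb'
            have hb'mem : b' ∈ (ps.filter (fun p => p.1.1 == a)).map (fun p => p.1.2) := by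
              simpa [PySem.List.mem_dedup] using hb'
            have hbb : b' ≠ b := fun h => hbmem (h ▸ hb'mem)
            simp [hbb]
          · simp [pvFilterB_nil ps a b hbmem]
      -- outer items
      rw [PySem.Dict.items_insert_of_contains _ _ hc, List.map_map]
      have : (fun p : Int × PySem.Dict Int (List Int) => (p.1, p.2.items)) ∘
          (fun p : Int × PySem.Dict Int (List Int) => if p.1 == a then (a, I.insert b (I.getD b [] ++ [i])) else p)
          = (fun r : Int × List (Int × List Int) =>
              if r.1 == a then (a, (I.insert b (I.getD b [] ++ [i])).items) else r) ∘
            (fun p : Int × PySem.Dict Int (List Int) => (p.1, p.2.items)) := by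
        funext p
        by_cases hp : p.1 = a <;> simp [Function.comp, hp]
      rw [this, ← List.map_map, ih, pvSpec, List.map_map, pvSpec]
      simp only [List.map_append, List.map_cons, List.map_nil]
      rw [pvDedup_append_of_mem hamem]
      apply List.map_congr_left
      intro a' ha'
      simp only [Function.comp]
      by_cases haa : a' = a
      · subst haa
        simp [hVitems]
      · have : (a' == a) = false := by simp [haa]
        simp only [this, Bool.false_eq_true, if_false]
        rw [pvInner_append_ne ps _ a' (by simpa using Ne.symm haa)]
    · -- a is a fresh outer key
      have hc' : M.contains a = false := by simpa using hc
      have hamem : a ∉ ps.map (fun p => p.1.1) := by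
        intro h; rw [hcont.mpr h] at hc'; simp at hc'
      simp only [hc', Bool.false_eq_true, if_false]
      rw [PySem.Dict.getD_insert_self, PySem.Dict.insert_insert_self]
      have hempty : ((PySem.Dict.empty : PySem.Dict Int (List Int)).getD b []) = [] := by
        simp [PySem.Dict.getD_empty]
      rw [hempty]
      rw [PySem.Dict.items_insert_of_not_contains _ _ hc', List.map_append, ih]
      simp only [pvSpec, List.map_append, List.map_cons, List.map_nil]
      rw [pvDedup_append_of_not_mem hamem, List.map_append]
      congr 1
      · apply List.map_congr_left
        intro a' ha'
        have ha'mem : a' ∈ ps.map (fun p => p.1.1) := by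
          simpa [PySem.List.mem_dedup] using ha'
        have haa : a' ≠ a := fun h => hamem (h ▸ ha'mem)
        rw [pvInner_append_ne ps _ a' (by simpa using Ne.symm haa)]
      · simp only [List.map_cons, List.map_nil]
        rw [pvInner_append_self]
        rw [pvFilter1_nil ps a hamem]
        have hfb : ps.filter (fun p => p.1.1 == a && p.1.2 == b) = [] :=
          pvFilterB_nil ps a b (by simp [pvFilter1_nil ps a hamem])
        simp only [List.map_nil, List.nil_append, PySem.List.dedup_eq_ofList]
        rw [PySem.Set.ofList_eq_self_of_nodup [b] (List.nodup_singleton b),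
          PySem.Dict.items_insert_of_not_contains _ _ (by simp [pysem])]
        simp [hfb]
        rfl

theorem find_merges_eq (c1 c2 : List Int) :
    find_merges c1 c2 =
      (List.foldl pvAstep PySem.Dict.empty
        (List.map (fun i => ((PySem.List.pyGetD c2 i 0, PySem.List.pyGetD c1 i 0), i))
          (PySem.List.pyRange 0 (Int.ofNat c2.length) 1))).items.map
        (fun p => (p.1, p.2.items)) := by
  unfold find_merges
  rw [List.foldl_map]
  rfl

theorem find_merges_alt_eq (c1 c2 : List Int) :
    find_merges_alt c1 c2 =
      pvSpec (List.map (fun i => ((PySem.List.pyGetD c2 i 0, PySem.List.pyGetD c1 i 0), i))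
        (PySem.List.pyRange 0 (Int.ofNat c2.length) 1)) := by
  unfold find_merges_alt pvSpec pvInner
  have hc2 : List.map (fun p => p.1.1)
      (List.map (fun i => ((PySem.List.pyGetD c2 i 0, PySem.List.pyGetD c1 i 0), i))
        (PySem.List.pyRange 0 (Int.ofNat c2.length) 1)) = c2 := by
    rw [List.map_map]; exact PySem.List.map_pyGetD_pyRange_zero' c2 0
  rw [hc2]
  simp only [List.filter_map, List.map_map, Function.comp_def]
  simp

-- ===== VERDICT (by name: the statement is the Claim_ definition above) =====
theorem find_merges_spec : Claim_equal_find_merges := by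
  intro c1 c2 _ _
  unfold Spec_find_merges
  rw [find_merges_eq, find_merges_alt_eq, pvMain]
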